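-- pv_equiv track=rewrite | github.com/Aidan2111/macro-oil-terminal | providers/ofac.py | bucket_counts
-- ===== SOURCE A (Python) =====
-- from typing import Any, Iterable
--
-- _REGION_TOKENS: dict[str, tuple[str, ...]] = {
--     "iran": (
--         "IRAN",
--         "IRGC",
--         "NIOC",
--         "MAPNA",
--         "SEPAH",
--     ),
--     "russia": (
--         "RUSSIA",
--         "RUSSIAN",
--         "ROSNEFT",
--         "LUKOIL",
--         "GAZPROM",
--         "SBERBANK",
--         "VTB",
--     ),
--     "venezuela": (
--         "VENEZUELA",
--         "PDVSA",
--     ),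
-- }
--
-- def _row_text(row: list[str]) -> str:
--     """Concatenate every column into a single uppercase haystack."""
--     return " | ".join((c or "").upper() for c in row)
--
-- def classify_row(row: list[str]) -> set[str]:
--     """Return the set of region buckets a row matches (possibly multiple)."""
--     text = _row_text(row)
--     hits: set[str] = set()
--     for region, tokens in _REGION_TOKENS.items():
--         if any(tok in text for tok in tokens):
--             hits.add(region)
--     return hits
--
-- def _row_key(row: list[str]) -> str:
--     """Stable key for delta computation. The SDN CSV has the SDN ID
--     (entity number) in column 0 followed by name, type, etc."""
--     if not row:
--         return ""
--     return str(row[0]).strip()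
--
-- def bucket_counts(rows: Iterable[list[str]]) -> dict[str, int]:
--     """Count rows per region bucket, deduplicated by SDN ID."""
--     seen: dict[str, set[str]] = {region: set() for region in _REGION_TOKENS}
--     for row in rows:
--         key = _row_key(row)
--         if not key:
--             continue
--         for region in classify_row(row):
--             seen[region].add(key)
--     return {region: len(s) for region, s in seen.items()}
-- ===== SOURCE B (Python) =====
-- from typing import Any, Iterable
--
-- _REGION_TOKENS: dict[str, tuple[str, ...]] = {
--     "iran": ("IRAN", "IRGC", "NIOC", "MAPNA", "SEPAH"),
--     "russia": ("RUSSIA", "RUSSIAN", "ROSNEFT", "LUKOIL", "GAZPROM", "SBERBANK", "VTB"),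
--     "venezuela": ("VENEZUELA", "PDVSA"),
-- }
--
-- def _row_text(row: list[str]) -> str:
--     return " | ".join((c or "").upper() for c in row)
--
-- def _row_key(row: list[str]) -> str:
--     if not row:
--         return ""
--     return str(row[0]).strip()
--
-- def _matches(row: list[str], tokens: tuple[str, ...]) -> bool:
--     text = _row_text(row)
--     return any(tok in text for tok in tokens)
--
-- def bucket_counts(rows: Iterable[list[str]]) -> dict[str, int]:
--     """Count rows per region bucket, deduplicated by SDN ID.
--
--     One region at a time: collect the distinct nonempty keys of the rows
--     matching that region's tokens, and count them."""
--     rows = list(rows)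
--     return {
--         region: len({_row_key(r) for r in rows
--                      if _row_key(r) and _matches(r, tokens)})
--         for region, tokens in _REGION_TOKENS.items()
--     }
-- ===== Notes on version B (the rewrite author's own statement) =====
-- stated objective: alternative
-- what changed: A makes one pass over the rows maintaining a region->set-of-keys dict updated through classify_row; B drops that mutable state entirely and computes each region's count independently as the size of a set comprehension of matching row keys (per-region filter-dedup-count passes instead of one stateful accumulation pass).
import Mathlib
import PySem

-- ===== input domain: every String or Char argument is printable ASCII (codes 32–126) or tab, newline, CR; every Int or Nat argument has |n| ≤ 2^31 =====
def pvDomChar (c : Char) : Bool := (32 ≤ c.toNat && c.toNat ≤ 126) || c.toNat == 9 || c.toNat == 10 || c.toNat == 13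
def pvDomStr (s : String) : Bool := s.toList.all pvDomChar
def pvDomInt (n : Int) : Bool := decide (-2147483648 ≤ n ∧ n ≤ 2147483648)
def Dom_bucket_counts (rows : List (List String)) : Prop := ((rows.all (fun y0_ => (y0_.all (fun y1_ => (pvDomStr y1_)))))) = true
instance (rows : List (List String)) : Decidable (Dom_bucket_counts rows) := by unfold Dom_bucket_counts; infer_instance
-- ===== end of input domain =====

-- ===== PORT A =====
-- B replaces A's single stateful pass (a region -> set-of-keys dict mutated via classify_row)
-- by independent per-region filter/dedup/count passes ("alternative": same cost, no mutable accumulator).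

def iranToks : List String := ["IRAN", "IRGC", "NIOC", "MAPNA", "SEPAH"]
def russiaToks : List String := ["RUSSIA", "RUSSIAN", "ROSNEFT", "LUKOIL", "GAZPROM", "SBERBANK", "VTB"]
def venezToks : List String := ["VENEZUELA", "PDVSA"]

def regionTokens : List (String × List String) :=
  [("iran", iranToks), ("russia", russiaToks), ("venezuela", venezToks)]

-- _row_text: " | ".join((c or "").upper() for c in row); on str columns `c or ""` is `c` unless c = "", and upper "" = ""
def rowText (row : List String) : String :=
  PySem.Str.join " | " (row.map PySem.Str.upper)

-- classify_row: the set of regions whose token tuple has a hit in the row text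
def classifyRow (row : List String) : PySem.Set String :=
  let text := rowText row
  regionTokens.foldl
    (fun hits rt => if rt.2.any (fun tok => PySem.Str.isIn tok text) then PySem.Set.add hits rt.1 else hits)
    PySem.Set.empty

-- _row_key
def rowKey (row : List String) : String :=
  match row with
  | [] => ""
  | c :: _ => PySem.Str.strip c

-- one iteration of A's `for row in rows` loop (the Python set `classify_row(row)` is only
-- iterated to add `key` into per-region sets, so its iteration order cannot affect the state)
def seenStep (d : PySem.Dict String (PySem.Set String)) (row : List String) :
    PySem.Dict String (PySem.Set String) :=
  let key := rowKey row
  if key == "" then d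
  else (classifyRow row).foldl
    (fun d region => d.modify region PySem.Set.empty (fun s => PySem.Set.add s key)) d

def bucket_counts (rows : List (List String)) : List (String × Int) :=
  let seen := rows.foldl seenStep
    (PySem.Dict.ofList (regionTokens.map (fun rt => (rt.1, PySem.Set.empty))))
  seen.items.map (fun p => (p.1, PySem.Set.len p.2))

-- ===== PORT B =====
-- _matches(row, tokens)
def matchesRow (row : List String) (tokens : List String) : Bool :=
  let text := rowText row
  tokens.any (fun tok => PySem.Str.isIn tok text)

def bucket_counts_alt (rows : List (List String)) : List (String × Int) :=
  regionTokens.map (fun rt =>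
    (rt.1,
     PySem.Set.len (PySem.Set.ofList
       ((rows.filter (fun r => rowKey r != "" && matchesRow r rt.2)).map rowKey))))

-- ===== PRECONDITION & SPEC =====
def Spec_bucket_counts (rows : List (List String)) (out : List (String × Int)) : Prop := out = bucket_counts_alt rows
instance (rows : List (List String)) (out : List (String × Int)) : Decidable (Spec_bucket_counts rows out) := by unfold Spec_bucket_counts; infer_instance

-- ===== CLAIM (what is proved, stated in full; the proofs are below) =====
def Claim_equal_bucket_counts : Prop := ∀ (rows : List (List String)), Dom_bucket_counts rows → Spec_bucket_counts rows (bucket_counts rows)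

-- ===== LEMMAS AND PROOFS =====

-- abbreviation for the three-entry state dict
def mkD (si sr sv : PySem.Set String) : PySem.Dict String (PySem.Set String) :=
  PySem.Dict.mk [("iran", si), ("russia", sr), ("venezuela", sv)]

-- what A's loop does to one region's key set over a list of rows
def accum (toks : List String) (rows : List (List String)) (s : PySem.Set String) : PySem.Set String :=
  rows.foldl
    (fun s r => if rowKey r != "" && matchesRow r toks then PySem.Set.add s (rowKey r) else s) s

theorem accum_cons (toks : List String) (r : List String) (t : List (List String)) (s : PySem.Set String) :
    accum toks (r :: t) s
      = accum toks t (if rowKey r != "" && matchesRow r toks then PySem.Set.add s (rowKey r) else s) := rfl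

theorem accum_eq_ofList (toks : List String) (rows : List (List String)) :
    accum toks rows ([] : PySem.Set String)
      = PySem.Set.ofList ((rows.filter (fun r => rowKey r != "" && matchesRow r toks)).map rowKey) := by
  rw [PySem.Set.ofList_eq_foldl]
  have h : ∀ (l : List (List String)) (s : PySem.Set String),
      accum toks l s
        = ((l.filter (fun r => rowKey r != "" && matchesRow r toks)).map rowKey).foldl PySem.Set.add s := by
    intro l
    induction l with
    | nil => intro s; rfl
    | cons r t ih =>
      intro s
      rw [accum_cons, List.filter_cons]
      by_cases hc : (rowKey r != "" && matchesRow r toks) = true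
      · rw [if_pos hc, hc, if_pos rfl, List.map_cons, List.foldl_cons, ih]
      · rw [if_neg hc, Bool.not_eq_true] at *
        rw [hc]
        simp only [Bool.false_eq_true, if_false]
        exact ih s
  exact h rows _

theorem modD_iran (si sr sv d0 : PySem.Set String) (f : PySem.Set String → PySem.Set String) :
    (mkD si sr sv).modify "iran" d0 f = mkD (f si) sr sv := by
  simp [mkD, PySem.Dict.modify, PySem.Dict.insert, PySem.Dict.getD, PySem.Dict.get?, PySem.Dict.contains]

theorem modD_russia (si sr sv d0 : PySem.Set String) (f : PySem.Set String → PySem.Set String) :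
    (mkD si sr sv).modify "russia" d0 f = mkD si (f sr) sv := by
  simp [mkD, PySem.Dict.modify, PySem.Dict.insert, PySem.Dict.getD, PySem.Dict.get?, PySem.Dict.contains]

theorem modD_venez (si sr sv d0 : PySem.Set String) (f : PySem.Set String → PySem.Set String) :
    (mkD si sr sv).modify "venezuela" d0 f = mkD si sr (f sv) := by
  simp [mkD, PySem.Dict.modify, PySem.Dict.insert, PySem.Dict.getD, PySem.Dict.get?, PySem.Dict.contains]

-- classify_row's result, split by the three regions
theorem classifyRow_eval (row : List String) :
    classifyRow row
      = (if matchesRow row iranToks then ["iran"] else [])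
        ++ (if matchesRow row russiaToks then ["russia"] else [])
        ++ (if matchesRow row venezToks then ["venezuela"] else []) := by
  cases h1 : matchesRow row iranToks <;>
  cases h2 : matchesRow row russiaToks <;>
  cases h3 : matchesRow row venezToks <;>
    simp only [classifyRow, matchesRow, regionTokens, List.foldl_cons, List.foldl_nil] at h1 h2 h3 ⊢ <;>
    rw [h1, h2, h3] <;> rfl

-- the effect of one row on the three-entry state dict
theorem seenStep_eval (row : List String) (si sr sv : PySem.Set String) :
    seenStep (mkD si sr sv) row
      = mkD (if rowKey row != "" && matchesRow row iranToks then PySem.Set.add si (rowKey row) else si)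
            (if rowKey row != "" && matchesRow row russiaToks then PySem.Set.add sr (rowKey row) else sr)
            (if rowKey row != "" && matchesRow row venezToks then PySem.Set.add sv (rowKey row) else sv) := by
  by_cases hk : (rowKey row == "") = true
  · have hk' : (rowKey row != "") = false := by simp [bne, hk]
    simp [seenStep, hk, hk']
  · have hk' : (rowKey row != "") = true := by simp [bne, hk]
    simp only [seenStep, hk, Bool.false_eq_true, if_false, classifyRow_eval, hk', Bool.true_and]
    by_cases h1 : matchesRow row iranToks = true <;>
    by_cases h2 : matchesRow row russiaToks = true <;>
    by_cases h3 : matchesRow row venezToks = true <;>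
      simp [h1, h2, h3, List.foldl, modD_iran, modD_russia, modD_venez]

-- A's whole loop, projected to the three per-region accumulations
theorem fold_eval (rows : List (List String)) :
    ∀ (si sr sv : PySem.Set String),
      rows.foldl seenStep (mkD si sr sv)
        = mkD (accum iranToks rows si) (accum russiaToks rows sr) (accum venezToks rows sv) := by
  induction rows with
  | nil => intro si sr sv; rfl
  | cons row t ih =>
    intro si sr sv
    rw [List.foldl_cons, seenStep_eval, accum_cons, accum_cons, accum_cons]
    exact ih _ _ _

-- ===== VERDICT (by name: the statement is the Claim_ definition above) =====
theorem bucket_counts_spec : Claim_equal_bucket_counts := by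
  intro rows _
  show bucket_counts rows = bucket_counts_alt rows
  unfold bucket_counts bucket_counts_alt
  have h0 : PySem.Dict.ofList (regionTokens.map (fun rt => (rt.1, (PySem.Set.empty : PySem.Set String))))
      = mkD PySem.Set.empty PySem.Set.empty PySem.Set.empty := by decide
  simp only [h0, fold_eval rows PySem.Set.empty PySem.Set.empty PySem.Set.empty]
  simp [mkD, regionTokens, accum_eq_ofList]
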